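-- pv_equiv track=rewrite | github.com/jjjiia/censusAmericans2026 | post_household_thread.py | build_thread_sections
-- ===== SOURCE A (Python) =====
-- from typing import List, Tuple
--
-- def clean_text(value: str) -> str:
--     text = (value or "").replace("\r\n", "\n").replace("\r", "\n").strip()
--     while "\n\n\n" in text:
--         text = text.replace("\n\n\n", "\n\n")
--     return text
--
-- def build_thread_sections(row) -> List[str]:
--     serial = clean_text(row.get("SERIAL", ""))
--
--     sections = [
--         clean_text(row.get("PERSON 1 DESCRIPTION", "")),
--         clean_text(row.get("RELATIONSHIP DESCRIPTION", "")),
--         clean_text(row.get("HOUSEHOLD DESCRIPTION", "")),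
--         clean_text(row.get("OTHER PERSON DESCRIPTIONS", "")),
--         f"IPUMS 2024 Household SERIAL {serial}" if serial else "IPUMS 2024 Household SERIAL",
--     ]
--
--     return [section for section in sections if section]
-- ===== SOURCE B (Python) =====
-- from typing import List
--
-- def clean_text(value: str) -> str:
--     text = (value or "").replace("\r\n", "\n").replace("\r", "\n").strip()
--     out = []
--     run = 0
--     for ch in text:
--         if ch == "\n":
--             if run < 2:
--                 out.append(ch)
--             run += 1
--         else:
--             out.append(ch)
--             run = 0
--     return "".join(out)
--
-- def build_thread_sections(row) -> List[str]:
--     serial = clean_text(row.get("SERIAL", ""))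
--
--     sections = [
--         clean_text(row.get("PERSON 1 DESCRIPTION", "")),
--         clean_text(row.get("RELATIONSHIP DESCRIPTION", "")),
--         clean_text(row.get("HOUSEHOLD DESCRIPTION", "")),
--         clean_text(row.get("OTHER PERSON DESCRIPTIONS", "")),
--         f"IPUMS 2024 Household SERIAL {serial}" if serial else "IPUMS 2024 Household SERIAL",
--     ]
--
--     return [section for section in sections if section]
-- ===== Notes on version B (the rewrite author's own statement) =====
-- stated objective: alternative
-- what changed: clean_text's replace-until-fixpoint loop over the whole string (rescan for '\n\n\n' and replace until none remain) is replaced by a single linear pass over the characters that keeps a run counter of consecutive newlines and emits at most two per run.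
import Mathlib
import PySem

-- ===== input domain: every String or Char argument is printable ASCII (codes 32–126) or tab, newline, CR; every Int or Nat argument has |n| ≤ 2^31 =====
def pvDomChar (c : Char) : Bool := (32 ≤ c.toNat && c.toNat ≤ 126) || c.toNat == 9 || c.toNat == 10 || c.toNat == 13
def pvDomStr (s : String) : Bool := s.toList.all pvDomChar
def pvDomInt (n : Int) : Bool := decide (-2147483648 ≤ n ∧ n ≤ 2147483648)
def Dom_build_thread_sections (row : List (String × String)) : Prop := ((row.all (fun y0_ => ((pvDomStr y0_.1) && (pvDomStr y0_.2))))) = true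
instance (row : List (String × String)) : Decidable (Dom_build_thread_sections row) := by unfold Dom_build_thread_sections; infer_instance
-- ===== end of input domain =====

-- B replaces clean_text's replace-until-fixpoint loop ('\n\n\n' -> '\n\n' until absent) by one
-- linear character pass with a newline-run counter that emits at most two '\n' per run; the
-- surrounding glue (normalization, strip, section assembly) is unchanged. Objective: alternative.

-- ===== PORT A =====
-- helper used by pvLoopA's termination proof (and by the equivalence proofs below):
-- pvRepAll is one left-to-right pass of Python's str.replace("\n\n\n", "\n\n").
def pvRepAll : List Char → List Char
  | '\n' :: '\n' :: '\n' :: t => '\n' :: '\n' :: pvRepAll t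
  | c :: t => c :: pvRepAll t
  | [] => []

theorem pvRepAll_len_le (s : List Char) : (pvRepAll s).length ≤ s.length := by
  induction s using pvRepAll.induct with
  | case1 t ih => simp [pvRepAll]; omega
  | case2 c t h ih => simp [pvRepAll, ih]
  | case3 => simp [pvRepAll]

theorem pvRepAll_cons (c : Char) (t : List Char)
    (h : ∀ t', ¬ (c = '\n' ∧ t = '\n' :: '\n' :: t')) : pvRepAll (c :: t) = c :: pvRepAll t := by
  rw [pvRepAll.eq_def]
  split
  · rename_i t' heq
    injection heq with h1 h2
    exact absurd ⟨h1, h2⟩ (h t')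
  · rename_i c' t' hx heq
    injection heq with h1 h2
    subst h1; subst h2; rfl
  · rename_i heq; exact absurd heq (by simp)

theorem pvGo_zero (old new l acc : List Char) :
    PySem.Chars.replace.go old new 0 l acc = acc.reverse ++ l := rfl

theorem pvGo_nil (old new : List Char) (n : Nat) (acc : List Char) :
    PySem.Chars.replace.go old new (n+1) [] acc = acc.reverse := rfl

theorem pvGo_cons (old new : List Char) (n : Nat) (c : Char) (t acc : List Char) :
    PySem.Chars.replace.go old new (n+1) (c::t) acc =
      if old.isPrefixOf (c::t) then
        PySem.Chars.replace.go old new n (List.drop old.length (c::t)) (new.reverse ++ acc)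
      else PySem.Chars.replace.go old new n t (c::acc) := rfl

theorem pvGo_eq (fuel : Nat) : ∀ (l acc : List Char), l.length ≤ fuel →
    PySem.Chars.replace.go ['\n','\n','\n'] ['\n','\n'] fuel l acc = acc.reverse ++ pvRepAll l := by
  induction fuel with
  | zero =>
    intro l acc h
    have hl : l = [] := by cases l <;> simp_all
    subst hl
    simp [pvGo_zero, pvRepAll]
  | succ n ih =>
    intro l acc h
    rcases l with _ | ⟨c, t⟩
    · simp [pvGo_nil, pvRepAll]
    · rw [pvGo_cons]
      by_cases hp : List.isPrefixOf ['\n','\n','\n'] (c :: t) = true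
      · obtain ⟨r, hr⟩ := List.isPrefixOf_iff_prefix.mp hp
        simp only [List.cons_append, List.nil_append] at hr
        injection hr with hc hr1
        subst hc; subst hr1
        simp only [List.length_cons] at h
        rw [if_pos hp]
        rw [show List.drop (['\n','\n','\n'] : List Char).length ('\n'::'\n'::'\n'::r) = r from rfl]
        rw [ih r _ (by omega)]
        simp [pvRepAll]
      · rw [if_neg hp]
        simp only [List.length_cons] at h
        rw [ih t (c :: acc) (by omega)]
        rw [pvRepAll_cons c t]
        · simp
        · rintro t' ⟨hc, ht⟩
          subst hc; subst ht
          simp [List.isPrefixOf] at hp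

theorem pvReplace_eq_repAll (s : List Char) :
    PySem.Chars.replace s ['\n','\n','\n'] ['\n','\n'] = pvRepAll s := by
  rw [PySem.Chars.replace]
  simp only [List.isEmpty]
  exact (pvGo_eq s.length s [] le_rfl).trans (by simp)

theorem pvRepAll_lt (s : List Char) (h : PySem.Chars.isIn ['\n','\n','\n'] s = true) :
    (pvRepAll s).length < s.length := by
  rw [PySem.Chars.isIn_iff_infix] at h
  induction s using pvRepAll.induct with
  | case1 t ih =>
    have := pvRepAll_len_le t
    simp [pvRepAll]; omega
  | case2 c t hpat ih =>
    rw [pvRepAll_cons c t (by intro t' ⟨hc, ht⟩; exact hpat t' hc ht)]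
    rcases List.infix_cons_iff.mp h with hpre | hinf
    · exfalso
      obtain ⟨hc, h2⟩ := List.cons_prefix_cons.mp hpre
      obtain ⟨r, hr⟩ := h2
      simp only [List.cons_append, List.nil_append] at hr
      exact hpat r hc.symm hr.symm
    · have := ih hinf
      simp; omega
  | case3 => simp at h

-- the while loop of clean_text
def pvLoopA (s : List Char) : List Char :=
  if PySem.Chars.isIn ['\n','\n','\n'] s then
    pvLoopA (PySem.Chars.replace s ['\n','\n','\n'] ['\n','\n'])
  else s
termination_by s.length
decreasing_by
  rw [pvReplace_eq_repAll]
  exact pvRepAll_lt _ (by assumption)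

def pvCleanA (v : List Char) : List Char :=
  pvLoopA (PySem.Chars.strip
    (PySem.Chars.replace (PySem.Chars.replace (if v = [] then [] else v) ['\r','\n'] ['\n']) ['\r'] ['\n']))

def pvCleanTextA (v : String) : String := String.ofList (pvCleanA v.toList)

-- row.get(k, "")
def pvGetRow (row : List (String × String)) (k : String) : String :=
  (PySem.Dict.mk row).getD k ""

def build_thread_sections (row : List (String × String)) : List String :=
  let serial := pvCleanTextA (pvGetRow row "SERIAL")
  let sections := [
    pvCleanTextA (pvGetRow row "PERSON 1 DESCRIPTION"),
    pvCleanTextA (pvGetRow row "RELATIONSHIP DESCRIPTION"),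
    pvCleanTextA (pvGetRow row "HOUSEHOLD DESCRIPTION"),
    pvCleanTextA (pvGetRow row "OTHER PERSON DESCRIPTIONS"),
    if serial != "" then "IPUMS 2024 Household SERIAL " ++ serial else "IPUMS 2024 Household SERIAL"]
  sections.filter (fun sec => sec != "")

-- ===== PORT B =====
-- single pass, k = current count of consecutive '\n' seen (Python's `run`)
def pvCollapse (k : Nat) : List Char → List Char
  | [] => []
  | c :: t =>
    if c = '\n' then
      (if k < 2 then c :: pvCollapse (k+1) t else pvCollapse (k+1) t)
    else c :: pvCollapse 0 t

def pvCleanB (v : List Char) : List Char :=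
  pvCollapse 0 (PySem.Chars.strip
    (PySem.Chars.replace (PySem.Chars.replace (if v = [] then [] else v) ['\r','\n'] ['\n']) ['\r'] ['\n']))

def pvCleanTextB (v : String) : String := String.ofList (pvCleanB v.toList)

def build_thread_sections_alt (row : List (String × String)) : List String :=
  let serial := pvCleanTextB (pvGetRow row "SERIAL")
  let sections := [
    pvCleanTextB (pvGetRow row "PERSON 1 DESCRIPTION"),
    pvCleanTextB (pvGetRow row "RELATIONSHIP DESCRIPTION"),
    pvCleanTextB (pvGetRow row "HOUSEHOLD DESCRIPTION"),
    pvCleanTextB (pvGetRow row "OTHER PERSON DESCRIPTIONS"),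
    if serial != "" then "IPUMS 2024 Household SERIAL " ++ serial else "IPUMS 2024 Household SERIAL"]
  sections.filter (fun sec => sec != "")

-- ===== PRECONDITION & SPEC =====
def Spec_build_thread_sections (row : List (String × String)) (out : List String) : Prop := out = build_thread_sections_alt row
instance (row : List (String × String)) (out : List String) : Decidable (Spec_build_thread_sections row out) := by unfold Spec_build_thread_sections; infer_instance

-- ===== CLAIM (what is proved, stated in full; the proofs are below) =====
def Claim_equal_build_thread_sections : Prop := ∀ (row : List (String × String)), Dom_build_thread_sections row → Spec_build_thread_sections row (build_thread_sections row)

-- ===== LEMMAS AND PROOFS =====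

-- unfolding equations for pvCollapse
theorem pvCollapse_nl_lt (k : Nat) (h : k < 2) (t : List Char) :
    pvCollapse k ('\n' :: t) = '\n' :: pvCollapse (k+1) t := by simp [pvCollapse, h]

theorem pvCollapse_nl_ge (k : Nat) (h : 2 ≤ k) (t : List Char) :
    pvCollapse k ('\n' :: t) = pvCollapse (k+1) t := by simp [pvCollapse, Nat.not_lt.mpr h]

theorem pvCollapse_ne (c : Char) (h : ¬ c = '\n') (k : Nat) (t : List Char) :
    pvCollapse k (c :: t) = c :: pvCollapse 0 t := by simp [pvCollapse, h]

-- collapse does not care about the exact counter once it is ≥ 2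
theorem pvCollapse_ge_two (s : List Char) : ∀ k k', 2 ≤ k → 2 ≤ k' →
    pvCollapse k s = pvCollapse k' s := by
  induction s with
  | nil => intros; rfl
  | cons c t ih =>
    intro k k' hk hk'
    by_cases hc : c = '\n'
    · subst hc
      rw [pvCollapse_nl_ge k hk, pvCollapse_nl_ge k' hk']
      exact ih (k+1) (k'+1) (by omega) (by omega)
    · rw [pvCollapse_ne c hc, pvCollapse_ne c hc]

-- one replace pass is invisible to collapse
theorem pvCollapse_repAll (s : List Char) : ∀ k, pvCollapse k (pvRepAll s) = pvCollapse k s := by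
  induction s using pvRepAll.induct with
  | case1 t ih =>
    intro k
    show pvCollapse k ('\n'::'\n'::pvRepAll t) = pvCollapse k ('\n'::'\n'::'\n'::t)
    match k with
    | 0 =>
      rw [pvCollapse_nl_lt 0 (by omega), pvCollapse_nl_lt 1 (by omega),
          pvCollapse_nl_lt 0 (by omega), pvCollapse_nl_lt 1 (by omega),
          pvCollapse_nl_ge 2 (by omega), ih 2]
      exact congrArg _ (congrArg _ (pvCollapse_ge_two t 2 3 (by omega) (by omega)))
    | 1 =>
      rw [pvCollapse_nl_lt 1 (by omega), pvCollapse_nl_ge 2 (by omega),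
          pvCollapse_nl_lt 1 (by omega), pvCollapse_nl_ge 2 (by omega),
          pvCollapse_nl_ge 3 (by omega), ih 3]
      exact congrArg _ (pvCollapse_ge_two t 3 4 (by omega) (by omega))
    | (m+2) =>
      rw [pvCollapse_nl_ge (m+2) (by omega), pvCollapse_nl_ge (m+3) (by omega),
          pvCollapse_nl_ge (m+2) (by omega), pvCollapse_nl_ge (m+3) (by omega),
          pvCollapse_nl_ge (m+4) (by omega), ih (m+4)]
      exact pvCollapse_ge_two t (m+4) (m+5) (by omega) (by omega)
  | case2 c t hpat ih =>
    intro k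
    rw [pvRepAll_cons c t (by rintro t' ⟨hc, ht⟩; exact hpat t' hc ht)]
    by_cases hc : c = '\n'
    · subst hc
      rcases Nat.lt_or_ge k 2 with hk | hk
      · rw [pvCollapse_nl_lt k hk, pvCollapse_nl_lt k hk, ih (k+1)]
      · rw [pvCollapse_nl_ge k hk, pvCollapse_nl_ge k hk, ih (k+1)]
    · rw [pvCollapse_ne c hc, pvCollapse_ne c hc, ih 0]
  | case3 => intro k; rfl

-- length of the leading newline run
def pvLeadRun : List Char → Nat
  | [] => 0
  | c :: t => if c = '\n' then pvLeadRun t + 1 else 0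

theorem pvReplicate_prefix_iff (n : Nat) : ∀ t : List Char,
    List.replicate n '\n' <+: t ↔ n ≤ pvLeadRun t := by
  induction n with
  | zero => intro t; simp
  | succ m ih =>
    intro t
    rcases t with _ | ⟨c, t⟩
    · simp [pvLeadRun, List.replicate_succ]
    · rw [List.replicate_succ, List.cons_prefix_cons]
      by_cases hc : c = '\n'
      · subst hc
        rw [show pvLeadRun ('\n'::t) = pvLeadRun t + 1 from by simp [pvLeadRun]]
        constructor
        · rintro ⟨_, hp⟩; have := (ih t).mp hp; omega
        · intro h; exact ⟨rfl, (ih t).mpr (by omega)⟩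
      · rw [show pvLeadRun (c::t) = 0 from by simp [pvLeadRun, hc]]
        constructor
        · rintro ⟨hc2, _⟩; exact absurd hc2.symm hc
        · intro h; exact absurd h (by omega)

theorem pvCollapse_fix (s : List Char) : ∀ k, ¬ (['\n','\n','\n'] <:+: s) →
    k + pvLeadRun s ≤ 2 → pvCollapse k s = s := by
  induction s with
  | nil => intros; rfl
  | cons c t ih =>
    intro k hinf hlen
    by_cases hc : c = '\n'
    · subst hc
      have hlr : pvLeadRun ('\n'::t) = pvLeadRun t + 1 := by simp [pvLeadRun]
      rw [pvCollapse_nl_lt k (by omega)]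
      exact congrArg _ (ih (k+1) (fun h => hinf (List.infix_cons h)) (by omega))
    · rw [pvCollapse_ne c hc]
      refine congrArg _ (ih 0 (fun h => hinf (List.infix_cons h)) ?_)
      by_contra hgt
      push Not at hgt
      have hp := (pvReplicate_prefix_iff 3 t).mpr (by omega)
      rw [show List.replicate 3 '\n' = ['\n','\n','\n'] from rfl] at hp
      exact hinf (List.infix_cons hp.isInfix)

theorem pvLoopA_eq_collapse (s : List Char) : pvLoopA s = pvCollapse 0 s := by
  induction s using pvLoopA.induct with
  | case1 s h ih =>
    rw [pvLoopA, if_pos h, ih, pvReplace_eq_repAll, pvCollapse_repAll]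
  | case2 s h =>
    rw [pvLoopA, if_neg h]
    have hni : ¬ (['\n','\n','\n'] <:+: s) :=
      (PySem.Chars.isIn_eq_false_iff _ _).mp (by simpa using h)
    have hlr : pvLeadRun s ≤ 2 := by
      by_contra hgt
      push Not at hgt
      have hp := (pvReplicate_prefix_iff 3 s).mpr (by omega)
      rw [show List.replicate 3 '\n' = ['\n','\n','\n'] from rfl] at hp
      exact hni hp.isInfix
    exact (pvCollapse_fix s 0 hni (by omega)).symm

theorem pvCleanText_eq (v : String) : pvCleanTextA v = pvCleanTextB v := by
  simp [pvCleanTextA, pvCleanTextB, pvCleanA, pvCleanB, pvLoopA_eq_collapse]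

-- ===== VERDICT (by name: the statement is the Claim_ definition above) =====
theorem build_thread_sections_spec : Claim_equal_build_thread_sections := by
  intro row _
  unfold Spec_build_thread_sections build_thread_sections build_thread_sections_alt
  simp only [pvCleanText_eq]
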